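-- pv_equiv track=rewrite | github.com/pypi-data/pypi-mirror-44 | packages/delete-last-comma/delete_last_comma-0.1.1.tar.gz/delete_last_comma-0.1.1/delete_last_comma/core.py | delete_last_bracket
-- ===== SOURCE A (Python) =====
-- def delete_last_bracket(unreadable_json_str) -> str:
--     """最後に余計な閉じかっこが存在する場合に削除する"""
--     reversed_list = list(reversed(unreadable_json_str))
--     for index, char in enumerate(reversed_list):
--         if char == "}":
--             del reversed_list[index]
--             break # 削除する閉じかっこは一つだけ
--
--     valid_order_list = reversed(reversed_list)
--     output = "".join(valid_order_list)
--     return output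
-- ===== SOURCE B (Python) =====
-- def delete_last_bracket(unreadable_json_str) -> str:
--     idx = unreadable_json_str.rfind("}")
--     if idx == -1:
--         return unreadable_json_str
--     return unreadable_json_str[:idx] + unreadable_json_str[idx + 1:]
-- ===== Notes on version B (the rewrite author's own statement) =====
-- stated objective: simpler
-- what changed: Replaces the list/reverse/enumerate-loop/delete/reverse/join pipeline with a single rfind of the last closing brace and one slice-concatenation, with no reversal or per-character list materialisation.
import Mathlib
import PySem

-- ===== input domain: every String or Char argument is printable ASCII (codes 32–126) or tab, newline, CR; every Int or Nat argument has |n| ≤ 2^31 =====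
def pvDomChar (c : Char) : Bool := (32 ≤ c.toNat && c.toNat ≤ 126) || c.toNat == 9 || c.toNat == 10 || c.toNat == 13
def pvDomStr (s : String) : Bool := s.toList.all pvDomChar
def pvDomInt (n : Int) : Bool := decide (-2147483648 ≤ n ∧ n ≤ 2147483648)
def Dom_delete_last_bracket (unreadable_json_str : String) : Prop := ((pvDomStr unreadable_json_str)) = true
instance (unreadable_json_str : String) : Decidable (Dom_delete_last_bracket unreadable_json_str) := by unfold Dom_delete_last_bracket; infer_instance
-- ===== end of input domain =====

-- ===== PORT A =====
-- B rewrites A's reverse/loop/delete/reverse/join pipeline as one last-index lookup and a slice (objective: simpler).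

-- the for-loop over the reversed list: delete the element at the first index holding '}', then break
def pvDelFirstBrace : List Char → List Char
  | [] => []
  | c :: cs => if c = '}' then cs else c :: pvDelFirstBrace cs

def delete_last_bracket (unreadable_json_str : String) : String :=
  let reversed_list := unreadable_json_str.toList.reverse
  String.ofList (pvDelFirstBrace reversed_list).reverse

-- ===== PORT B =====
-- s.rfind('}') : index of the last '}' or -1 (ported via first occurrence in the reversed list)
def pvRfindBrace (l : List Char) : Int :=
  match l.reverse.idxOf? '}' with
  | none => -1
  | some j => (l.length : Int) - 1 - (j : Int)

def delete_last_bracket_alt (unreadable_json_str : String) : String :=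
  let l := unreadable_json_str.toList
  let idx := pvRfindBrace l
  if idx = -1 then unreadable_json_str
  else String.ofList (l.take idx.toNat ++ l.drop (idx.toNat + 1))

-- ===== PRECONDITION & SPEC =====
def Spec_delete_last_bracket (unreadable_json_str : String) (out : String) : Prop := out = delete_last_bracket_alt unreadable_json_str
instance (unreadable_json_str : String) (out : String) : Decidable (Spec_delete_last_bracket unreadable_json_str out) := by unfold Spec_delete_last_bracket; infer_instance

-- ===== CLAIM =====
def Claim_equal_delete_last_bracket : Prop := ∀ (unreadable_json_str : String), Dom_delete_last_bracket unreadable_json_str → Spec_delete_last_bracket unreadable_json_str (delete_last_bracket unreadable_json_str)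

-- ===== LEMMAS AND PROOFS =====

theorem pvDelFirstBrace_not_mem (l : List Char) (h : '}' ∉ l) : pvDelFirstBrace l = l := by
  induction l with
  | nil => rfl
  | cons c cs ih =>
    simp only [List.mem_cons, not_or] at h
    simp [pvDelFirstBrace, Ne.symm h.1, ih h.2]

theorem pvDelFirstBrace_append (x y : List Char) (hx : '}' ∉ x) :
    pvDelFirstBrace (x ++ '}' :: y) = x ++ y := by
  induction x with
  | nil => simp [pvDelFirstBrace]
  | cons c cs ih =>
    simp only [List.mem_cons, not_or] at hx
    simp [pvDelFirstBrace, Ne.symm hx.1, ih hx.2]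

theorem idxOf?_append_not_mem (x y : List Char) (hx : '}' ∉ x) :
    (x ++ '}' :: y).idxOf? '}' = some x.length := by
  induction x with
  | nil => simp [List.idxOf?_cons]
  | cons c cs ih =>
    simp only [List.mem_cons, not_or] at hx
    simp [List.idxOf?_cons, Ne.symm hx.1, ih hx.2]

theorem split_last_brace (l : List Char) (h : '}' ∈ l) :
    ∃ u v, l = u ++ '}' :: v ∧ '}' ∉ v := by
  induction l with
  | nil => cases h
  | cons c cs ih =>
    by_cases hm : '}' ∈ cs
    · obtain ⟨u, v, rfl, hv⟩ := ih hm
      exact ⟨c :: u, v, rfl, hv⟩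
    · rcases List.mem_cons.1 h with rfl | hc
      · exact ⟨[], cs, rfl, hm⟩
      · exact absurd hc hm

-- ===== VERDICT =====
theorem delete_last_bracket_spec : Claim_equal_delete_last_bracket := by
  intro s _
  unfold Spec_delete_last_bracket delete_last_bracket delete_last_bracket_alt pvRfindBrace
  by_cases h : '}' ∈ s.toList
  · obtain ⟨u, v, hl, hv⟩ := split_last_brace s.toList h
    have hvr : '}' ∉ v.reverse := by simpa using hv
    have hrev : s.toList.reverse = v.reverse ++ '}' :: u.reverse := by
      simp [hl]
    have hidx : s.toList.reverse.idxOf? '}' = some v.reverse.length := by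
      rw [hrev]; exact idxOf?_append_not_mem _ _ hvr
    have hA : pvDelFirstBrace s.toList.reverse = v.reverse ++ u.reverse := by
      rw [hrev]; exact pvDelFirstBrace_append _ _ hvr
    have hidx2 : ((s.toList.length : Int) - 1 - ((v.reverse.length : Nat) : Int)) = (u.length : Int) := by
      simp [hl]; ring
    simp only [hidx, hA, hidx2]
    have hne : ¬ ((u.length : Int) = -1) := by omega
    simp only [hne, if_false, Int.toNat_natCast]
    have htake : List.take u.length s.toList = u := by
      rw [hl]; simp
    have hdrop : List.drop (u.length + 1) s.toList = v := by
      have hsplit : s.toList = (u ++ ['}']) ++ v := by simp [hl]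
      rw [hsplit]
      simp
    rw [htake, hdrop]
    simp
  · have hnr : '}' ∉ s.toList.reverse := by simpa using h
    have hidx : s.toList.reverse.idxOf? '}' = none := by
      simp [List.idxOf?_eq_none_iff, hnr]
    simp [hidx, pvDelFirstBrace_not_mem _ hnr]
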